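-- pv_equiv track=rewrite | github.com/boilinlinz/1modulus | 1modulus.py | makeMod
-- ===== SOURCE A (Python) =====
-- def makeMod(a=0, b=0):
--     try:
--         a = abs(int(a))
--         b = abs(int(b))
--         g = 1
--         for x in range(a+1):
--             h = b * x
--             if h < a:   # Finds the highest number that when * to b is less than a
--                 g = h
--                 c = a - g   #Subtract highest number to the dividend
--             elif h == a:   #If b can be multiplied to be equal to a, remainder is 0
--                 c = 0
--         return c
--     except:
--         return None
-- ===== SOURCE B (Python) =====
-- def makeMod(a=0, b=0):
--     try:
--         a = abs(int(a))
--         b = abs(int(b))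
--         c = 0
--         for _ in range(a):
--             c += 1
--             if c == b:   # counter wraps around at b: c cycles 0,1,...,b-1
--                 c = 0
--         return c
--     except:
--         return None
-- ===== Notes on version B (the rewrite author's own statement) =====
-- stated objective: alternative
-- what changed: Replaces the scan over all multiples b*x (tracking the largest one below a and re-deriving the remainder by subtraction) with a single wraparound counter that cycles 0..b-1 once per unit of a and IS the remainder (cheaper per-iteration work: an increment and one compare instead of a multiply, compare and subtract); b==0 never triggers the wrap so it returns a, as in A.
import Mathlib
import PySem

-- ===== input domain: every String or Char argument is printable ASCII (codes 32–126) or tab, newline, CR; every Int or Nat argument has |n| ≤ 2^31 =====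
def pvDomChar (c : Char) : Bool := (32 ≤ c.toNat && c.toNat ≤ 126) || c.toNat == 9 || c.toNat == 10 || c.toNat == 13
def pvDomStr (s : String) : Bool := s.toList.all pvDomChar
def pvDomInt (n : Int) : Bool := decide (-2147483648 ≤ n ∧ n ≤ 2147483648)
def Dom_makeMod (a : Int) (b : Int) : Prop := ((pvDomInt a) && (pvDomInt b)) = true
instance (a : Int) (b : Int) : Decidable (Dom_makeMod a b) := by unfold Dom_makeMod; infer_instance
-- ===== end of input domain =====

-- B replaces A's scan over all multiples b*x with a single wraparound counter that is the remainder itself (alternative algorithm, same cost; never raises on Int inputs).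

-- ===== PORT A =====
-- one loop step: x ↦ updates (g, c); c : Option Int (unset c would make the return raise into the except → None; in fact c is always set)
def makeModStep (a b : Int) (s : Int × Option Int) (x : Int) : Int × Option Int :=
  let h := b * x
  if h < a then (h, some (a - h))
  else if h = a then (s.1, some 0)
  else s

def makeMod (a : Int) (b : Int) : Option Int :=
  let a := |a|
  let b := |b|
  ((PySem.List.pyRange 0 (a + 1) 1).foldl (makeModStep a b) (1, none)).2

-- ===== PORT B =====
-- one loop step: c += 1; if c == b: c = 0
def makeModAltStep (b : Int) (c : Int) (_x : Int) : Int :=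
  let c := c + 1
  if c = b then 0 else c

def makeMod_alt (a : Int) (b : Int) : Option Int :=
  some ((PySem.List.pyRange 0 |a| 1).foldl (makeModAltStep |b|) 0)

-- ===== PRECONDITION & SPEC =====
def Spec_makeMod (a : Int) (b : Int) (out : Option Int) : Prop := out = makeMod_alt a b
instance (a : Int) (b : Int) (out : Option Int) : Decidable (Spec_makeMod a b out) := by unfold Spec_makeMod; infer_instance

-- ===== CLAIM (what is proved, stated in full; the proofs are below) =====
def Claim_equal_makeMod : Prop := ∀ (a : Int) (b : Int), Dom_makeMod a b → Spec_makeMod a b (makeMod a b)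

-- ===== LEMMAS AND PROOFS =====

-- invariant for B's loop: after k increments the counter equals k % b (k % 0 = k covers b = 0)
theorem makeModAlt_fold (b : Int) (hb : 0 ≤ b) (n : ℕ) :
    (PySem.List.pyRange 0 (n : Int) 1).foldl (makeModAltStep b) 0 = (n : Int) % b := by
  induction n with
  | zero => simp
  | succ n ih =>
    have hsplit : PySem.List.pyRange 0 ((n : Int) + 1) 1
        = PySem.List.pyRange 0 (n : Int) 1 ++ [(n : Int)] := by
      exact PySem.List.pyRange_one_succ_right (by omega)
    push_cast
    rw [hsplit, List.foldl_append, ih]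
    simp only [List.foldl_cons, List.foldl_nil, makeModAltStep]
    rcases eq_or_lt_of_le hb with hb0 | hb0
    · -- b = 0 : the wrap never fires, counter is n + 1 = (n+1) % 0
      have hn : (0 : Int) ≤ (n : Int) % b := by rw [← hb0]; simp
      rw [if_neg (by rw [← hb0] at hn ⊢; omega), ← hb0]
      simp
    · have hmlt : (n : Int) % b < b := Int.emod_lt_of_pos _ hb0
      have hmnn : (0 : Int) ≤ (n : Int) % b := Int.emod_nonneg _ (by omega)
      have hdecomp : (n : Int) = b * ((n : Int) / b) + (n : Int) % b := (Int.ediv_add_emod _ _).symm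
      by_cases hw : (n : Int) % b + 1 = b
      · rw [if_pos hw]
        have hrw : (n : Int) + 1 = b * ((n : Int) / b + 1) := by
          rw [mul_add, mul_one]; linarith [hdecomp]
        rw [hrw, Int.mul_emod_right]
      · rw [if_neg hw]
        have hrw : (n : Int) + 1 = (n : Int) % b + 1 + b * ((n : Int) / b) := by
          linarith [hdecomp]
        conv_rhs => rw [hrw]
        rw [Int.add_mul_emod_self_left]
        exact (Int.emod_eq_of_lt (by omega) (by omega)).symm

-- invariant for A's loop: after processing x = 0 .. k-1 (k ≥ 1), c = a - b * min (k-1) (a / b)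
theorem makeMod_fold (a b : Int) (ha : 0 ≤ a) (hb : 0 ≤ b) (k : Int) (hk : 1 ≤ k) :
    ((PySem.List.pyRange 0 k 1).foldl (makeModStep a b) (1, none)).2
      = some (a - b * min (k - 1) (a / b)) := by
  have hk' : 0 ≤ k - 1 := by omega
  obtain ⟨n, hn⟩ : ∃ n : ℕ, k - 1 = (n : Int) := ⟨(k-1).toNat, by omega⟩
  have hkn : k = (n : Int) + 1 := by omega
  subst hkn
  clear hk hk' hn
  induction n with
  | zero =>
    simp only [Nat.cast_zero, zero_add]
    rw [show PySem.List.pyRange 0 1 1 = [0] from by decide]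
    simp only [List.foldl_cons, List.foldl_nil, makeModStep, mul_zero]
    rcases lt_or_eq_of_le ha with ha0 | ha0
    · rw [if_pos ha0]
      have h1 : 0 ≤ a / b := Int.ediv_nonneg ha hb
      have h2 : min (0 : Int) (a / b) = 0 := by omega
      simp [h2]
    · rw [if_neg (by omega), if_pos ha0]
      simp [← ha0]
  | succ n ih =>
    have hsplit : PySem.List.pyRange 0 ((n : Int) + 1 + 1) 1
        = PySem.List.pyRange 0 ((n : Int) + 1) 1 ++ [(n : Int) + 1] := by
      exact PySem.List.pyRange_one_succ_right (by omega)
    push_cast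
    rw [hsplit, List.foldl_append]
    set s := (PySem.List.pyRange 0 ((n : Int) + 1) 1).foldl (makeModStep a b) (1, none) with hs
    have hs2 : s.2 = some (a - b * min ((n : Int) + 1 - 1) (a / b)) := ih
    simp only [List.foldl_cons, List.foldl_nil, makeModStep]
    set x : Int := (n : Int) + 1 with hx
    by_cases h1 : b * x < a
    · rw [if_pos h1]
      -- b * x < a, b ≥ 0 ⇒ (b > 0 and x ≤ a/b hence min = x) or b = 0
      rcases eq_or_lt_of_le hb with hb0 | hb0
      · simp [← hb0]
      · have hxle : x ≤ a / b := (Int.le_ediv_iff_mul_le hb0).mpr (by nlinarith)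
        have hmin : min (x + 1 - 1) (a / b) = x := by omega
        rw [hmin]
    · rw [if_neg h1]
      by_cases h2 : b * x = a
      · rw [if_pos h2]
        rcases eq_or_lt_of_le hb with hb0 | hb0
        · -- b = 0 forces a = 0 here
          have hb' : b = 0 := hb0.symm
          have ha0 : a = 0 := by rw [hb'] at h2; simpa using h2.symm
          simp [hb', ha0]
        · have hdiv : a / b = x := by
            rw [← h2, mul_comm, Int.mul_ediv_cancel _ (by omega)]
          have hxle : x ≤ a / b := le_of_eq hdiv.symm
          have hmin : min (x + 1 - 1) (a / b) = x := by omega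
          rw [hmin, ← h2]
          simp
      · rw [if_neg h2]
        rw [hs2]
        -- b * x > a : min stays a / b in both
        have hgt : a < b * x := by omega
        have hb0 : 0 < b := by
          rcases eq_or_lt_of_le hb with hb0 | hb0
          · exfalso; rw [← hb0] at hgt; simp at hgt; omega
          · exact hb0
        have hdivlt : a / b < x := by
          by_contra hc
          push_neg at hc
          have := (Int.le_ediv_iff_mul_le hb0).mp hc
          nlinarith
        have hm1 : min (x - 1) (a / b) = a / b := by omega
        have hm2 : min (x + 1 - 1) (a / b) = a / b := by omega
        rw [hm1, hm2]

-- ===== VERDICT (by name: the statement is the Claim_ definition above) =====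
theorem makeMod_spec : Claim_equal_makeMod := by
  intro a b _
  show makeMod a b = makeMod_alt a b
  unfold makeMod makeMod_alt
  have ha : (0 : Int) ≤ |a| := abs_nonneg a
  have hb : (0 : Int) ≤ |b| := abs_nonneg b
  have hcast : |a| = ((|a|.toNat : ℕ) : Int) := by omega
  rw [makeMod_fold |a| |b| ha hb (|a| + 1) (by omega), hcast,
      makeModAlt_fold |b| hb |a|.toNat, ← hcast]
  congr 1
  have hmin : min (|a| + 1 - 1) (|a| / |b|) = |a| / |b| := by
    rcases eq_or_lt_of_le hb with hb0 | hb0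
    · rw [← hb0]; simp
    · have := Int.ediv_le_self (b := |b|) ha
      omega
  rw [hmin]
  have := Int.ediv_add_emod |a| |b|
  omega
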